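-- pv_equiv track=rewrite | github.com/HailXD/sql-convert | convert.py | trim_comments
-- ===== SOURCE A (Python) =====
-- def trim_comments(lines):
--     cleaned = []
--     gap = False
--     for line in lines:
--         if not line:
--             if cleaned:
--                 gap = True
--             continue
--         if gap:
--             cleaned.append("")
--             gap = False
--         cleaned.append(line)
--     return cleaned
-- ===== SOURCE B (Python) =====
-- def trim_comments(lines):
--     blocks = []
--     cur = []
--     for line in lines:
--         if line:
--             cur.append(line)
--         elif cur:
--             blocks.append(cur)
--             cur = []
--     if cur:
--         blocks.append(cur)
--     out = []
--     for i, b in enumerate(blocks):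
--         if i > 0:
--             out.append("")
--         out.extend(b)
--     return out
-- ===== Notes on version B (the rewrite author's own statement) =====
-- stated objective: alternative
-- what changed: B replaces A's single-pass gap-flag scan with a two-pass scheme: first collect maximal blocks of consecutive non-empty lines, then join the blocks with a single empty-line separator.
import Mathlib
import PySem

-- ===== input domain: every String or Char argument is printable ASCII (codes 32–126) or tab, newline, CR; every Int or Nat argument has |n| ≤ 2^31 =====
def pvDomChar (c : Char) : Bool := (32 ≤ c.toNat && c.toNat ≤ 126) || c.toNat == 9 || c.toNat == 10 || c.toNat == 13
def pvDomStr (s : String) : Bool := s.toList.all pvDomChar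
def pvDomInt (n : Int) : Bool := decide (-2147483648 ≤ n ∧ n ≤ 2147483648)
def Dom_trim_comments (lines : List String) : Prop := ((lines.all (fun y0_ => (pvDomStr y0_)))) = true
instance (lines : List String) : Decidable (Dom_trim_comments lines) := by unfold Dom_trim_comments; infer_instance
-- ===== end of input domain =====

-- B keeps a list of blocks of consecutive non-empty lines and joins them with one "" separator,
-- instead of A's single-pass gap flag; same cost, different decomposition (objective: alternative).

-- ===== PORT A =====
-- for-loop over `lines` with state (cleaned, gap)
def pvGoA : List String → List String → Bool → List String
  | [], cleaned, _ => cleaned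
  | line :: rest, cleaned, gap =>
    if line = "" then
      pvGoA rest cleaned (if cleaned = [] then gap else true)
    else
      pvGoA rest ((if gap then cleaned ++ [""] else cleaned) ++ [line]) false

def trim_comments (lines : List String) : List String := pvGoA lines [] false

-- ===== PORT B =====
-- first pass: collect maximal blocks of consecutive non-empty lines
def pvGoB : List String → List (List String) → List String → List (List String)
  | [], blocks, cur => if cur = [] then blocks else blocks ++ [cur]
  | line :: rest, blocks, cur =>
    if line ≠ "" then pvGoB rest blocks (cur ++ [line])
    else if cur = [] then pvGoB rest blocks cur
    else pvGoB rest (blocks ++ [cur]) []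

def trim_comments_alt (lines : List String) : List String :=
  let blocks := pvGoB lines [] []
  -- second pass: indexed loop, emitting "" before every block except the first
  (blocks.foldl (fun (acc : List String × Nat) b =>
      ((if acc.2 > 0 then acc.1 ++ [""] else acc.1) ++ b, acc.2 + 1)) ([], 0)).1

-- ===== PRECONDITION & SPEC =====
def Spec_trim_comments (lines : List String) (out : List String) : Prop := out = trim_comments_alt lines
instance (lines : List String) (out : List String) : Decidable (Spec_trim_comments lines out) := by unfold Spec_trim_comments; infer_instance

-- ===== CLAIM (what is proved, stated in full; the proofs are below) =====
def Claim_equal_trim_comments : Prop := ∀ (lines : List String), Dom_trim_comments lines → Spec_trim_comments lines (trim_comments lines)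

-- ===== LEMMAS AND PROOFS =====

-- specification form of B's second pass
def pvSep : List (List String) → List String
  | [] => []
  | b :: r => b ++ r.flatMap (fun x => "" :: x)

lemma pvSep_append_one (bs : List (List String)) (x : List String) :
    pvSep (bs ++ [x]) = pvSep bs ++ (if bs = [] then [] else [""]) ++ x := by
  cases bs with
  | nil => simp [pvSep]
  | cons b r => simp [pvSep]

def pvJoin (bs : List (List String)) (cur : List String) : List String :=
  pvSep (bs ++ if cur = [] then [] else [cur])

lemma pvJoin_snoc (bs : List (List String)) (cur : List String) (l : String)
    (hcur : cur ≠ []) : pvJoin bs (cur ++ [l]) = pvJoin bs cur ++ [l] := by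
  simp [pvJoin, hcur, pvSep_append_one]

lemma pvJoin_nil_ne (bs : List (List String)) (cur : List String)
    (hcur : cur ≠ []) : pvJoin bs cur ≠ [] := by
  simp [pvJoin, hcur, pvSep_append_one]

lemma pvSep_ne_of_mem_ne (bs : List (List String)) (hbs : bs ≠ [])
    (hne : ∀ b ∈ bs, b ≠ []) : pvSep bs ≠ [] := by
  cases bs with
  | nil => exact absurd rfl hbs
  | cons b r =>
    simp only [pvSep]
    intro h
    rcases List.append_eq_nil_iff.mp h with ⟨h1, _⟩
    exact hne b (by simp) h1

lemma pvGoA_eq_pvGoB (ls : List String) (bs : List (List String)) (cur : List String)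
    (hne : ∀ b ∈ bs, b ≠ []) :
    pvGoA ls (pvJoin bs cur) (decide (cur = [] ∧ bs ≠ [])) = pvSep (pvGoB ls bs cur) := by
  induction ls generalizing bs cur with
  | nil =>
    by_cases hcur : cur = [] <;> simp [pvGoA, pvGoB, pvJoin, hcur]
  | cons l rest ih =>
    by_cases hl : l = ""
    · subst hl
      by_cases hcur : cur = []
      · subst hcur
        by_cases hbs : bs = []
        · subst hbs
          simpa [pvGoA, pvGoB, pvJoin, pvSep] using ih [] [] (by simp)
        · have hc : pvJoin bs [] ≠ [] := by
            simpa [pvJoin] using pvSep_ne_of_mem_ne bs hbs hne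
          simpa [pvGoA, pvGoB, hc, hbs] using ih bs [] hne
      · have hc : pvJoin bs cur ≠ [] := pvJoin_nil_ne bs cur hcur
        have h2 : pvJoin (bs ++ [cur]) [] = pvJoin bs cur := by simp [pvJoin, hcur]
        have hne' : ∀ b ∈ bs ++ [cur], b ≠ [] := by
          intro b hb
          rcases List.mem_append.mp hb with h | h
          · exact hne b h
          · simp at h; subst h; exact hcur
        have := ih (bs ++ [cur]) [] hne'
        rw [h2] at this
        simpa [pvGoA, pvGoB, hcur, hc] using this
    · -- nonempty line
      by_cases hcur : cur = []
      · subst hcur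
        by_cases hbs : bs = []
        · subst hbs
          have := ih [] [l] (by simp)
          simpa [pvGoA, pvGoB, hl, pvJoin, pvSep] using this
        · have := ih bs [l] hne
          have hj : pvJoin bs [] ++ [""] ++ [l] = pvJoin bs [l] := by
            simp [pvJoin, pvSep_append_one, hbs]
          rw [← hj] at this
          simpa [pvGoA, pvGoB, hl, hbs, List.append_assoc] using this
      · have := ih bs (cur ++ [l]) hne
        rw [pvJoin_snoc bs cur l hcur] at this
        simpa [pvGoA, pvGoB, hl, hcur] using this

-- B's indexed second pass computes pvSep
lemma pvFold_emit (bs : List (List String)) (a : List String) (n : Nat) (hn : 0 < n) :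
    (bs.foldl (fun (acc : List String × Nat) b =>
      ((if acc.2 > 0 then acc.1 ++ [""] else acc.1) ++ b, acc.2 + 1)) (a, n)).1
      = a ++ bs.flatMap (fun x => "" :: x) := by
  induction bs generalizing a n with
  | nil => simp
  | cons b r ih =>
    simp only [List.foldl_cons, if_pos hn, List.flatMap_cons]
    rw [ih (a ++ [""] ++ b) (n + 1) (Nat.succ_pos n)]
    simp

lemma pvEmit_eq_sep (bs : List (List String)) :
    (bs.foldl (fun (acc : List String × Nat) b =>
      ((if acc.2 > 0 then acc.1 ++ [""] else acc.1) ++ b, acc.2 + 1)) ([], 0)).1 = pvSep bs := by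
  cases bs with
  | nil => simp [pvSep]
  | cons b r =>
    simp only [List.foldl_cons, pvSep]
    simpa using pvFold_emit r b 1 Nat.one_pos

-- ===== VERDICT (by name: the statement is the Claim_ definition above) =====
theorem trim_comments_spec : Claim_equal_trim_comments := by
  intro lines _
  unfold Spec_trim_comments trim_comments trim_comments_alt
  rw [pvEmit_eq_sep]
  simpa [pvJoin, pvSep] using pvGoA_eq_pvGoB lines [] [] (by simp)
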